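-- pv_equiv track=rewrite | github.com/kacperturon/AoC | AoC2022/Day5.py | topCharsState
-- ===== SOURCE A (Python) =====
-- def topCharsState(state):
--   topChars=[]
--   for _ in range(len(state[0])):
--     topChars.append(None)
--   for line in state:
--     for id,c in enumerate(line):
--       if c != '' and topChars[id] is None:
--         topChars[id] = c
--   out = ''
--   for arr in topChars:
--     out += arr[1]
--   return out
-- ===== SOURCE B (Python) =====
-- def topCharsState(state):
--   width = len(state[0])
--   chars = []
--   for id in range(width):
--     for line in state:
--       if id < len(line) and line[id] != '':
--         chars.append(line[id][1])
--         break
--   return ''.join(chars)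
-- ===== Notes on version B (the rewrite author's own statement) =====
-- stated objective: alternative
-- what changed: Replaced A's row-major sweep that fills a per-column None-list accumulator with a column-major scan: for each column index, scan the rows and take the second character of the first non-empty cell with an early break, joining the pieces at the end.
import Mathlib
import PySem

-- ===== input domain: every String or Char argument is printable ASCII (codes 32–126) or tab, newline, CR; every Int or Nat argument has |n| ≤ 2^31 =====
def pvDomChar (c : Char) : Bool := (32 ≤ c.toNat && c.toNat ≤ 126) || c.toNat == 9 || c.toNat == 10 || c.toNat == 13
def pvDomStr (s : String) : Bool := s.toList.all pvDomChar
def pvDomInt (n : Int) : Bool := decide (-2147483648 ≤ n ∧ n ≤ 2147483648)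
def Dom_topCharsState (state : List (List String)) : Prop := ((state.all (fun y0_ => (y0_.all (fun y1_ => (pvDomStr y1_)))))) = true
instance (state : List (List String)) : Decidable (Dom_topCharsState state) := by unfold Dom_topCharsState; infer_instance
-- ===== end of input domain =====

-- B replaces A's row-major sweep filling a per-column accumulator by a per-column scan
-- of the rows with early termination (objective: alternative decomposition, same cost).

-- ===== PORT A =====

-- shared primitive: s[1] rendered as a (possibly empty) char list; Python raises
-- IndexError when len(s) < 2 — those inputs are excluded by Pre_topCharsState
def pvSecond (s : String) : List Char :=
  match PySem.Str.pyGet? s 1 with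
  | some ch => [ch]
  | none => []

-- inner 'for id,c in enumerate(line)' loop of A; when id ≥ len(topChars) and c ≠ ''
-- Python raises IndexError (excluded by Pre_), the port leaves tc unchanged there
def pvFillRow : List (Option String) → Nat → List String → List (Option String)
  | tc, _, [] => tc
  | tc, id, c :: cs =>
      pvFillRow (if c ≠ "" ∧ tc[id]? = some none then tc.set id (some c) else tc) (id + 1) cs

def topCharsState (state : List (List String)) : String :=
  -- len(state[0]); on empty state Python raises IndexError (excluded by Pre_)
  let w := (state.headD []).length
  let tc := state.foldl (fun t line => pvFillRow t 0 line) (List.replicate w (none : Option String))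
  -- out += arr[1]; on arr = None Python raises TypeError (excluded by Pre_)
  String.ofList (tc.foldl (fun out arr =>
    match arr with
    | none => out
    | some s => out ++ pvSecond s) [])

-- ===== PORT B =====

-- B's inner loop: scan the rows for column id, stop at the first non-empty cell
def pvColScan : List (List String) → Nat → List Char
  | [], _ => []
  | line :: rest, id =>
      if id < line.length ∧ line.getD id "" ≠ "" then pvSecond (line.getD id "")
      else pvColScan rest id

def topCharsState_alt (state : List (List String)) : String :=
  let width := (state.headD []).length
  String.ofList ((List.range width).flatMap (fun id => pvColScan state id))

-- ===== PRECONDITION & SPEC =====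

-- Exactly the inputs on which Python A returns: state non-empty (else IndexError on
-- state[0]); no row has a non-empty cell past len(state[0]) (else IndexError on
-- topChars[id]); and in every column some row k holds a non-empty cell of length ≥ 2
-- while all rows before it hold an empty (or missing) cell in that column
-- (else TypeError on None[1] / IndexError on arr[1]).
def Pre_topCharsState (state : List (List String)) : Prop :=
  state ≠ [] ∧
  (∀ line ∈ state, ((line.drop (state.headD []).length).all (fun c => c = "")) = true) ∧
  (∀ id, id < (state.headD []).length →
     ∃ k, k < state.length ∧ (state.getD k []).getD id "" ≠ "" ∧
       2 ≤ ((state.getD k []).getD id "").toList.length ∧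
       ∀ j, j < k → (state.getD j []).getD id "" = "")
instance (state : List (List String)) : Decidable (Pre_topCharsState state) := by
  unfold Pre_topCharsState; infer_instance

def pvWitness_topCharsState : List (List String) := [["ab", "cd"], ["ef", "gh"]]

def Spec_topCharsState (state : List (List String)) (out : String) : Prop := out = topCharsState_alt state
instance (state : List (List String)) (out : String) : Decidable (Spec_topCharsState state out) := by unfold Spec_topCharsState; infer_instance

-- ===== CLAIM (what is proved, stated in full; the proofs are below) =====
def Claim_equal_topCharsState : Prop := ∀ (state : List (List String)), Dom_topCharsState state → Pre_topCharsState state → Spec_topCharsState state (topCharsState state)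

-- ===== LEMMAS AND PROOFS =====

-- first non-empty cell in column id (a row shorter than id is skipped)
def pvColFirst : List (List String) → Nat → Option String
  | [], _ => none
  | line :: rest, id =>
      if line.getD id "" ≠ "" then some (line.getD id "") else pvColFirst rest id

-- the cell a single row contributes to column k, as an option
def pvCellOpt (cs : List String) (k : Nat) : Option String :=
  if cs.getD k "" ≠ "" then some (cs.getD k "") else none

theorem pvFill_get (cs : List String) : ∀ (tc : List (Option String)) (j i : Nat),
    (pvFillRow tc j cs)[i]? =
      if i < j then tc[i]?
      else match tc[i]? with
        | some none => some (pvCellOpt cs (i - j))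
        | o => o := by
  induction cs with
  | nil =>
      intro tc j i
      simp only [pvFillRow, pvCellOpt, List.getD, List.getElem?_nil, Option.getD_none]
      cases h : tc[i]? with
      | none => split <;> simp
      | some o => cases o <;> split <;> simp
  | cons c cs ih =>
      intro tc j i
      simp only [pvFillRow]
      rw [ih]
      rcases lt_trichotomy i j with hij | hij | hij
      · have h1 : i < j + 1 := by omega
        rw [if_pos h1, if_pos hij]
        split
        · exact List.getElem?_set_ne (by omega)
        · rfl
      · subst hij
        rw [if_pos (show i < i + 1 by omega), if_neg (show ¬ i < i by omega)]
        by_cases hcond : c ≠ "" ∧ tc[i]? = some none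
        · rw [if_pos hcond]
          have hlen : i < tc.length := by
            by_contra hle
            have hnone : tc[i]? = none := List.getElem?_eq_none (show tc.length ≤ i by omega)
            rw [hnone] at hcond
            simp at hcond
          rw [hcond.2, List.getElem?_set_self hlen]
          simp [pvCellOpt, List.getD, hcond.1]
        · rw [if_neg hcond]
          cases h : tc[i]? with
          | none => rfl
          | some o =>
            cases o with
            | some s => rfl
            | none =>
              have hc : c = "" := by
                by_contra hc'
                exact hcond ⟨hc', h⟩
              simp [pvCellOpt, List.getD, hc]
      · rw [if_neg (show ¬ i < j + 1 by omega), if_neg (show ¬ i < j by omega)]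
        have hset : (if c ≠ "" ∧ tc[j]? = some none then tc.set j (some c) else tc)[i]? = tc[i]? := by
          split
          · exact List.getElem?_set_ne (by omega)
          · rfl
        rw [hset]
        have hcell : pvCellOpt cs (i - (j + 1)) = pvCellOpt (c :: cs) (i - j) := by
          have : i - j = (i - (j + 1)) + 1 := by omega
          rw [this]
          simp [pvCellOpt, List.getD]
        rw [hcell]

theorem pvFold_get : ∀ (rows : List (List String)) (tc : List (Option String)) (i : Nat),
    (rows.foldl (fun t line => pvFillRow t 0 line) tc)[i]? =
      match tc[i]? with
      | some none => some (pvColFirst rows i)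
      | o => o := by
  intro rows
  induction rows with
  | nil =>
      intro tc i
      simp only [List.foldl_nil, pvColFirst]
      cases h : tc[i]? with
      | none => rfl
      | some o => cases o <;> rfl
  | cons r rs ih =>
      intro tc i
      simp only [List.foldl_cons]
      rw [ih, pvFill_get, if_neg (show ¬ i < 0 by omega)]
      cases h : tc[i]? with
      | none => rfl
      | some o =>
        cases o with
        | some s => rfl
        | none =>
          simp only [Nat.sub_zero, pvCellOpt, pvColFirst]
          by_cases hrc : r.getD i "" ≠ ""
          · rw [if_pos hrc, if_pos hrc]
          · rw [if_neg hrc, if_neg hrc]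

theorem pvFinal_tc (state : List (List String)) (w : Nat) :
    state.foldl (fun t line => pvFillRow t 0 line) (List.replicate w (none : Option String)) =
      (List.range w).map (pvColFirst state) := by
  apply List.ext_getElem?
  intro i
  rw [pvFold_get]
  by_cases hi : i < w
  · rw [List.getElem?_replicate, if_pos hi]
    simp [List.getElem?_range hi]
  · rw [List.getElem?_replicate, if_neg hi]
    rw [List.getElem?_eq_none (by simpa using hi)]

theorem pvOutFold : ∀ (l : List (Option String)) (acc : List Char),
    l.foldl (fun out arr =>
      match arr with
      | none => out
      | some s => out ++ pvSecond s) acc =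
    acc ++ l.flatMap (fun arr =>
      match arr with
      | none => []
      | some s => pvSecond s) := by
  intro l
  induction l with
  | nil => intro acc; simp
  | cons a l ih =>
      intro acc
      simp only [List.foldl_cons, List.flatMap_cons]
      rw [ih]
      cases a <;> simp

theorem pvColScan_eq (id : Nat) : ∀ (rows : List (List String)),
    pvColScan rows id =
      match pvColFirst rows id with
      | none => []
      | some s => pvSecond s := by
  intro rows
  induction rows with
  | nil => rfl
  | cons line rest ih =>
      simp only [pvColScan, pvColFirst]
      by_cases hc : line.getD id "" ≠ ""
      · have hlt : id < line.length := by
          by_contra hge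
          apply hc
          have hge' : line.length ≤ id := by omega
          simp [List.getD, List.getElem?_eq_none hge']
        rw [if_pos ⟨hlt, hc⟩, if_pos hc]
      · rw [if_neg (fun h => hc h.2), if_neg hc]
        exact ih

theorem pvJoin_eq (state : List (List String)) : ∀ (ids : List Nat),
    ((ids.map (pvColFirst state)).flatMap (fun arr =>
      match arr with
      | none => []
      | some s => pvSecond s)) = ids.flatMap (fun id => pvColScan state id) := by
  intro ids
  induction ids with
  | nil => rfl
  | cons i is ih =>
      simp only [List.map_cons, List.flatMap_cons, ih]
      rw [pvColScan_eq]

-- ===== VERDICT (by name: the statement is the Claim_ definition above) =====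
theorem topCharsState_spec : Claim_equal_topCharsState := by
  intro state _hdom _hpre
  unfold Spec_topCharsState
  simp only [topCharsState, topCharsState_alt]
  rw [pvFinal_tc, pvOutFold, List.nil_append, pvJoin_eq]
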